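-- pv_equiv track=rewrite | github.com/Ryosuke4219/portfolio | tests/docs/test_index_evidence_labels.py | _extract_evidence_section_lines
-- ===== SOURCE A (Python) =====
-- def _extract_evidence_section_lines(text: str) -> list[str]:
--     lines = []
--     in_section = False
--     for raw_line in text.splitlines():
--         line = raw_line.rstrip()
--         if line == "## Evidence Library {#evidence-library}":
--             in_section = True
--             continue
--         if in_section and line.startswith("## "):
--             break
--         if in_section:
--             stripped = line.strip()
--             if stripped:
--                 lines.append(stripped)
--     return lines
-- ===== SOURCE B (Python) =====
-- _HEADER = "## Evidence Library {#evidence-library}"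
--
--
-- def _extract_evidence_section_lines(text: str) -> list[str]:
--     # locate-then-slice: find the header, slice out the section body, clean it up
--     stripped = [raw.rstrip() for raw in text.splitlines()]
--     try:
--         start = stripped.index(_HEADER) + 1
--     except ValueError:
--         return []
--     tail = stripped[start:]
--     stop = next((i for i, l in enumerate(tail) if l.startswith("## ")), len(tail))
--     return [s for s in (l.strip() for l in tail[:stop]) if s]
-- ===== Notes on version B (the rewrite author's own statement) =====
-- stated objective: alternative
-- what changed: B replaces A's single stateful scan (in_section flag, break) by a locate-then-slice pipeline: rstrip all lines once, find the header's index, cut the body at the next '## ' line, then strip-and-filter the slice.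
import Mathlib
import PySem

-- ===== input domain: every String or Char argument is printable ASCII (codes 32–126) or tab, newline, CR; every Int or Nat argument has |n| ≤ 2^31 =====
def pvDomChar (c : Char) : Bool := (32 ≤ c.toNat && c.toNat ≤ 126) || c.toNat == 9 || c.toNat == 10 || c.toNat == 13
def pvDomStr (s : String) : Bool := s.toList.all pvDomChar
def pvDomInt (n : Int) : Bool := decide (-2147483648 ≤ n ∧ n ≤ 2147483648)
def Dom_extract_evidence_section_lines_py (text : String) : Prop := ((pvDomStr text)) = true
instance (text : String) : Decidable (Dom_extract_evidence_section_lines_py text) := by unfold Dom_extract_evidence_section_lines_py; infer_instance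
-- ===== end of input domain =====

-- B replaces A's single stateful scan by a locate-then-slice pipeline (same cost, different decomposition).


def pvHeader : String := "## Evidence Library {#evidence-library}"

-- ===== PORT A =====
-- the stateful loop: ins = in_section flag, acc = lines; returning acc mid-list is the 'break'
def pvGoA : List String → Bool → List String → List String
  | [], _, acc => acc
  | raw :: rest, ins, acc =>
    let line := PySem.Str.rstrip raw
    if line == pvHeader then pvGoA rest true acc
    else if ins && PySem.Str.startswith line "## " then acc
    else if ins then
      (let stripped := PySem.Str.strip line
       if stripped != "" then pvGoA rest ins (acc ++ [stripped]) else pvGoA rest ins acc)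
    else pvGoA rest ins acc

def extract_evidence_section_lines_py (text : String) : List String :=
  pvGoA (PySem.Str.splitlines text) false []

-- ===== PORT B =====
def extract_evidence_section_lines_py_alt (text : String) : List String :=
  let stripped := (PySem.Str.splitlines text).map PySem.Str.rstrip
  match PySem.List.index? stripped pvHeader with
  | none => []
  | some start =>
    let tail := stripped.drop (start + 1)   -- stripped[start:] with start = index + 1 ≥ 0
    let stop := (tail.findIdx? (fun l => PySem.Str.startswith l "## ")).getD tail.length
    ((tail.take stop).map PySem.Str.strip).filter (fun s => s != "")

-- ===== PRECONDITION & SPEC =====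
-- Pre_ excludes texts whose rstripped lines contain the exact header line more than once: there
-- A's skip-and-continue on the repeated header and B's ending of the section are both defensible.
def Pre_extract_evidence_section_lines_py (text : String) : Prop :=
  ((PySem.Str.splitlines text).map PySem.Str.rstrip).count pvHeader ≤ 1
instance (text : String) : Decidable (Pre_extract_evidence_section_lines_py text) := by
  unfold Pre_extract_evidence_section_lines_py; infer_instance

def pvWitness_extract_evidence_section_lines_py : String :=
  "## Evidence Library {#evidence-library}\n line \n## Next"

def Spec_extract_evidence_section_lines_py (text : String) (out : List String) : Prop := out = extract_evidence_section_lines_py_alt text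
instance (text : String) (out : List String) : Decidable (Spec_extract_evidence_section_lines_py text out) := by unfold Spec_extract_evidence_section_lines_py; infer_instance

-- ===== CLAIM (what is proved, stated in full; the proofs are below) =====
def Claim_equal_extract_evidence_section_lines_py : Prop := ∀ (text : String), Dom_extract_evidence_section_lines_py text → Pre_extract_evidence_section_lines_py text → Spec_extract_evidence_section_lines_py text (extract_evidence_section_lines_py text)

-- ===== LEMMAS AND PROOFS =====

-- body collector: what B computes from the lines after the header
def pvCollect (ls : List String) : List String :=
  let stop := (ls.findIdx? (fun l => PySem.Str.startswith l "## ")).getD ls.length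
  ((ls.take stop).map PySem.Str.strip).filter (fun s => s != "")

theorem pvCollect_nil : pvCollect [] = [] := rfl

theorem pvCollect_cons (h : String) (t : List String) :
    pvCollect (h :: t) =
      if PySem.Str.startswith h "## " then []
      else (if PySem.Str.strip h != "" then [PySem.Str.strip h] else []) ++ pvCollect t := by
  unfold pvCollect
  by_cases hp : PySem.Str.startswith h "## " = true
  · simp only [List.findIdx?_cons, hp, if_pos, Option.getD_some, List.take_zero,
      List.map_nil, List.filter_nil]
  · simp only [List.findIdx?_cons, hp, ite_false, Bool.false_eq_true]
    have ht : List.take t.length (List.map PySem.Str.strip t) = List.map PySem.Str.strip t := by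
      rw [List.take_of_length_le (by simp)]
    cases hm : t.findIdx? (fun l => PySem.Str.startswith l "## ") with
    | none =>
        simp only [Option.map_none, Option.getD_none, List.length_cons, List.take_succ_cons,
          List.map_cons, List.filter_cons]
        by_cases hs : PySem.Str.strip h != "" <;> simp [hs]
    | some k =>
        simp only [Option.map_some, Option.getD_some, List.take_succ_cons, List.map_cons,
          List.filter_cons]
        by_cases hs : PySem.Str.strip h != "" <;> simp [hs]

-- in-section phase: header absent from the remaining (rstripped) lines
theorem pvGoA_in (ls : List String) (acc : List String)
    (hnm : pvHeader ∉ ls.map PySem.Str.rstrip) :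
    pvGoA ls true acc = acc ++ pvCollect (ls.map PySem.Str.rstrip) := by
  induction ls generalizing acc with
  | nil => simp [pvGoA, pvCollect_nil]
  | cons h t ih =>
    simp only [List.map_cons, List.mem_cons, not_or] at hnm
    obtain ⟨hne, hnt⟩ := hnm
    rw [List.map_cons, pvCollect_cons]
    unfold pvGoA
    simp only [beq_iff_eq]
    rw [if_neg (fun he => hne he.symm)]
    simp only [Bool.true_and]
    by_cases hp : PySem.Str.startswith (PySem.Str.rstrip h) "## " = true
    · rw [if_pos hp, if_pos hp, List.append_nil]
    · rw [if_neg hp, if_neg hp]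
      by_cases hs : PySem.Str.strip (PySem.Str.rstrip h) != ""
      · rw [if_pos hs, if_pos hs, ih _ hnt, List.append_assoc, if_pos trivial]
      · rw [if_neg hs, if_neg hs, ih _ hnt, List.nil_append, if_pos trivial]

-- searching phase: header occurs at most once among the remaining rstripped lines
theorem pvGoA_search (ls : List String) (acc : List String)
    (hc : (ls.map PySem.Str.rstrip).count pvHeader ≤ 1) :
    pvGoA ls false acc =
      acc ++ (match PySem.List.index? (ls.map PySem.Str.rstrip) pvHeader with
              | none => []
              | some start => pvCollect ((ls.map PySem.Str.rstrip).drop (start + 1))) := by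
  induction ls generalizing acc with
  | nil => simp [pvGoA, PySem.List.index?]
  | cons h t ih =>
    rw [List.map_cons]
    unfold pvGoA
    simp only [beq_iff_eq]
    by_cases he : PySem.Str.rstrip h = pvHeader
    · rw [if_pos he, he]
      rw [List.map_cons, he, List.count_cons_self] at hc
      have hnt : pvHeader ∉ t.map PySem.Str.rstrip := by
        intro hm
        have := List.count_pos_iff.mpr hm
        omega
      rw [PySem.List.index?_cons_self]
      simpa using pvGoA_in t acc hnt
    · rw [if_neg he]
      simp only [Bool.false_and, Bool.false_eq_true, if_false]
      rw [List.map_cons, List.count_cons] at hc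
      have hcond : (PySem.Str.rstrip h == pvHeader) = false :=
        beq_eq_false_iff_ne.mpr he
      rw [hcond] at hc
      simp only [Bool.false_eq_true, if_false, Nat.add_zero] at hc
      rw [PySem.List.index?_cons_of_ne (h := he)]
      rw [ih acc hc]
      cases PySem.List.index? (t.map PySem.Str.rstrip) pvHeader with
      | none => simp
      | some k => simp [List.drop_succ_cons]

-- ===== VERDICT (by name: the statement is the Claim_ definition above) =====
theorem extract_evidence_section_lines_py_spec : Claim_equal_extract_evidence_section_lines_py := by
  intro text _ hpre
  unfold Spec_extract_evidence_section_lines_py extract_evidence_section_lines_py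
    extract_evidence_section_lines_py_alt
  rw [pvGoA_search _ _ hpre, List.nil_append]
  cases hI : PySem.List.index? ((PySem.Str.splitlines text).map PySem.Str.rstrip) pvHeader with
  | none => simp only [hI]
  | some k => simp only [hI]; rfl
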